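-- pv_equiv track=rewrite | github.com/Marcosbc05/Fundamentos-Python | 4/9.py | cinco_vocales
-- ===== SOURCE A (Python) =====
-- def cinco_vocales(palabra):
--     a=True
--     palabra.lower()
--     vocales='aeiou'
--     contador=[0]*5
--     for i in range(len(palabra)):
--         if palabra[i] in vocales:
--             pos=vocales.index(palabra[i])
--             contador[pos]+=1
--     if 0 in contador:
--         a=False
--     return a
-- ===== SOURCE B (Python) =====
-- def cinco_vocales(palabra):
--     return all(v in palabra for v in 'aeiou')
-- ===== Notes on version B (the rewrite author's own statement) =====
-- stated objective: simpler
-- what changed: Instead of scanning the word and bucketing vowel hits into a length-5 counter array then testing for a zero, B loops over the five vowels and tests each one's membership in the word, keeping no counter and no per-character Python loop; the discarded no-op lower() call is dropped.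
import Mathlib
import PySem

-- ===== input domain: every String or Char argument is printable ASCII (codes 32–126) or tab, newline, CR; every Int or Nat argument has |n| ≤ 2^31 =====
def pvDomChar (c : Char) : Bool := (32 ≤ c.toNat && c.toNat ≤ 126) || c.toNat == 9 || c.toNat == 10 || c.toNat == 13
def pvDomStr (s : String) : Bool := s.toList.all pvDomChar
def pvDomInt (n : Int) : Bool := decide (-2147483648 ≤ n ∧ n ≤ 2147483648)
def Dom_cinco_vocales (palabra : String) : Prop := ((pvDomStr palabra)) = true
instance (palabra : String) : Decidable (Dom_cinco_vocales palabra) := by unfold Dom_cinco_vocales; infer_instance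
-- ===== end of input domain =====

-- B replaces A's word-scan with a length-5 counter array by a direct membership test of each of the five vowels in the word (simpler).


-- ===== PORT A =====
-- the body of A's for-loop over i in range(len(palabra)), acting on the counter array
def pvStep (cont : List Int) (c : Char) : List Int :=
  if ("aeiou".toList).contains c then          -- palabra[i] in vocales
    let pos := (PySem.List.index? ("aeiou".toList) c).getD 0   -- vocales.index(palabra[i]); membership already checked, so index? is some
    cont.set pos (cont.getD pos 0 + 1)         -- contador[pos] += 1
  else cont

def cinco_vocales (palabra : String) : Bool :=
  let a := true
  -- `palabra.lower()` in A discards its result: a no-op, nothing to port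
  let contador : List Int := List.replicate 5 0
  let contador :=
    (PySem.List.pyRange 0 (palabra.toList.length : Int) 1).foldl
      (fun cont i => pvStep cont (PySem.List.pyGetD palabra.toList i ' '))
      contador
  let a := if contador.contains 0 then false else a
  a

-- ===== PORT B =====
def cinco_vocales_alt (palabra : String) : Bool :=
  "aeiou".toList.all (fun v => palabra.toList.contains v)

-- ===== PRECONDITION & SPEC =====
def Spec_cinco_vocales (palabra : String) (out : Bool) : Prop := out = cinco_vocales_alt palabra
instance (palabra : String) (out : Bool) : Decidable (Spec_cinco_vocales palabra out) := by unfold Spec_cinco_vocales; infer_instance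

-- ===== CLAIM (what is proved, stated in full; the proofs are below) =====
def Claim_equal_cinco_vocales : Prop := ∀ (palabra : String), Dom_cinco_vocales palabra → Spec_cinco_vocales palabra (cinco_vocales palabra)

-- ===== LEMMAS AND PROOFS =====

-- invariant of A's loop: the counter array holds the running count of each vowel
theorem pvLoop_eq (l : List Char) (na ne ni no nu : Int) :
    l.foldl pvStep [na, ne, ni, no, nu] =
      [na + l.count 'a', ne + l.count 'e', ni + l.count 'i',
       no + l.count 'o', nu + l.count 'u'] := by
  induction l generalizing na ne ni no nu with
  | nil => simp
  | cons c t ih =>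
    rw [List.foldl_cons]
    by_cases ha : c = 'a'
    · subst ha
      rw [show pvStep [na, ne, ni, no, nu] 'a' = [na + 1, ne, ni, no, nu] from rfl, ih]
      simp; ring
    · by_cases he : c = 'e'
      · subst he
        rw [show pvStep [na, ne, ni, no, nu] 'e' = [na, ne + 1, ni, no, nu] from rfl, ih]
        simp [ha]; ring
      · by_cases hi : c = 'i'
        · subst hi
          rw [show pvStep [na, ne, ni, no, nu] 'i' = [na, ne, ni + 1, no, nu] from rfl, ih]
          simp [ha, he]; ring
        · by_cases ho : c = 'o'
          · subst ho
            rw [show pvStep [na, ne, ni, no, nu] 'o' = [na, ne, ni, no + 1, nu] from rfl, ih]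
            simp [ha, he, hi]; ring
          · by_cases hu : c = 'u'
            · subst hu
              rw [show pvStep [na, ne, ni, no, nu] 'u' = [na, ne, ni, no, nu + 1] from rfl, ih]
              simp [ha, he, hi, ho]; ring
            · have hnc : pvStep [na, ne, ni, no, nu] c = [na, ne, ni, no, nu] := by
                simp [pvStep, List.contains_eq_mem, ha, he, hi, ho, hu]
              rw [hnc, ih]
              simp [ha, he, hi, ho, hu]

-- ===== VERDICT (by name: the statement is the Claim_ definition above) =====
theorem cinco_vocales_spec : Claim_equal_cinco_vocales := by
  intro palabra _
  unfold Spec_cinco_vocales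
  simp only [cinco_vocales, cinco_vocales_alt,
    PySem.List.foldl_pyRange_zero_pyGetD' palabra.toList ' ' pvStep]
  rw [show (List.replicate 5 (0 : Int)) = [0, 0, 0, 0, 0] from rfl, pvLoop_eq]
  simp only [List.contains_eq_mem, List.mem_cons, List.not_mem_nil, or_false, zero_add]
  have hmem : ∀ c : Char, (0 = (List.count c palabra.toList : Int)) ↔ c ∉ palabra.toList := by
    intro c; rw [eq_comm, Int.natCast_eq_zero, List.count_eq_zero]
  split_ifs with h
  · simp only [decide_eq_true_eq, hmem] at h
    rw [eq_comm, List.all_eq_false]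
    rcases h with h | h | h | h | h
    · exact ⟨'a', by decide, by simpa using h⟩
    · exact ⟨'e', by decide, by simpa using h⟩
    · exact ⟨'i', by decide, by simpa using h⟩
    · exact ⟨'o', by decide, by simpa using h⟩
    · exact ⟨'u', by decide, by simpa using h⟩
  · simp only [decide_eq_true_eq, hmem] at h
    push Not at h
    obtain ⟨hA, hE, hI, hO, hU⟩ := h
    rw [eq_comm, List.all_eq_true]
    intro v hv
    simp only [show "aeiou".toList = ['a', 'e', 'i', 'o', 'u'] from rfl, List.mem_cons,
      List.not_mem_nil, or_false] at hv
    simp only [decide_eq_true_eq]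
    rcases hv with rfl | rfl | rfl | rfl | rfl <;> assumption
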